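-- pv_equiv track=rewrite | github.com/reecedoyle/adu_threshold | thresholds.py | splitFeedbackList
-- ===== SOURCE A (Python) =====
-- def splitFeedbackList(feedBackPoints):
-- 	# Split the points with feedback into seperate categories, based on classification and user's feed back. eg: Classifier: Amber, Feedback: red
-- 	GR = []
-- 	GA = []
-- 	AR = []
-- 	AG = []
-- 	RA = []
-- 	RG = []
--
-- 	for x in feedBackPoints:
-- 		if x[1] == "green":
-- 			if x[2] == "red":
-- 				GR.append(x[0])
-- 				continue
-- 			if x[2] == "amber":
-- 				GA.append(x[0])
-- 				continue
-- 		if x[1] == "amber":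
-- 			if x[2] == "red":
-- 				AR.append(x[0])
-- 				continue
-- 			if x[2] == "green":
-- 				AG.append(x[0])
-- 				continue
--
-- 		if x[1] == "red":
-- 			if x[2] == "amber":
-- 				RA.append(x[0])
-- 				continue
-- 			if x[2] == "green":
-- 				RG.append(x[0])
-- 				continue
--
-- 	return (GR,GA,AR,AG,RA,RG)
-- ===== SOURCE B (Python) =====
-- def splitFeedbackList(feedBackPoints):
-- 	# Six independent filter passes, one per (classifier, feedback) category.
-- 	def pick(c, f):
-- 		return [x[0] for x in feedBackPoints if x[1] == c and x[2] == f]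
-- 	return (pick("green", "red"), pick("green", "amber"),
-- 	        pick("amber", "red"), pick("amber", "green"),
-- 	        pick("red", "amber"), pick("red", "green"))
-- ===== Notes on version B (the rewrite author's own statement) =====
-- stated objective: simpler
-- what changed: Replaces the single accumulating loop with nested if/continue cascade by six independent filter comprehensions, one per (classifier, feedback) pair.
import Mathlib
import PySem

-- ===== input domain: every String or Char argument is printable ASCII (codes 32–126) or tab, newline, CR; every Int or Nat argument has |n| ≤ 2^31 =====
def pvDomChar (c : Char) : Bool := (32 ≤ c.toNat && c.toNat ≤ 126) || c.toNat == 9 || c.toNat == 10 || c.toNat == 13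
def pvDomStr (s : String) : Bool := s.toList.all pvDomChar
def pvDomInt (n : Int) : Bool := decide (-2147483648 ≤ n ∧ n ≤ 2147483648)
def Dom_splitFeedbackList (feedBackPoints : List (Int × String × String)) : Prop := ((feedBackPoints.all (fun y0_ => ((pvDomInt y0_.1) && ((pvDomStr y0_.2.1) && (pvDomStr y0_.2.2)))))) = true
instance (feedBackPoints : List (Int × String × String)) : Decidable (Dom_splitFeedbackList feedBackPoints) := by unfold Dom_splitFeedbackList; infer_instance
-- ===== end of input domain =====

-- B replaces A's single accumulating loop (nested if/continue cascade) by six independent filter passes, one per category (objective: simpler).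


-- ===== PORT A =====
-- one loop iteration of A: the if/continue cascade (the continues make it an else-chain;
-- after a failed inner test control falls to the later top-level ifs, whose x[1] tests then fail)
def pvStepA (s : List Int × List Int × List Int × List Int × List Int × List Int)
    (x : Int × String × String) :
    List Int × List Int × List Int × List Int × List Int × List Int :=
  let (gr, ga, ar, ag, ra, rg) := s
  if x.2.1 = "green" ∧ x.2.2 = "red" then (gr ++ [x.1], ga, ar, ag, ra, rg)
  else if x.2.1 = "green" ∧ x.2.2 = "amber" then (gr, ga ++ [x.1], ar, ag, ra, rg)
  else if x.2.1 = "amber" ∧ x.2.2 = "red" then (gr, ga, ar ++ [x.1], ag, ra, rg)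
  else if x.2.1 = "amber" ∧ x.2.2 = "green" then (gr, ga, ar, ag ++ [x.1], ra, rg)
  else if x.2.1 = "red" ∧ x.2.2 = "amber" then (gr, ga, ar, ag, ra ++ [x.1], rg)
  else if x.2.1 = "red" ∧ x.2.2 = "green" then (gr, ga, ar, ag, ra, rg ++ [x.1])
  else (gr, ga, ar, ag, ra, rg)

def splitFeedbackList (feedBackPoints : List (Int × String × String)) :
    List Int × List Int × List Int × List Int × List Int × List Int :=
  feedBackPoints.foldl pvStepA ([], [], [], [], [], [])

-- ===== PORT B =====
def pvPick (feedBackPoints : List (Int × String × String)) (c f : String) : List Int :=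
  (feedBackPoints.filter (fun x => x.2.1 == c && x.2.2 == f)).map (·.1)

def splitFeedbackList_alt (feedBackPoints : List (Int × String × String)) :
    List Int × List Int × List Int × List Int × List Int × List Int :=
  (pvPick feedBackPoints "green" "red", pvPick feedBackPoints "green" "amber",
   pvPick feedBackPoints "amber" "red", pvPick feedBackPoints "amber" "green",
   pvPick feedBackPoints "red" "amber", pvPick feedBackPoints "red" "green")

-- ===== PRECONDITION & SPEC =====
def Spec_splitFeedbackList (feedBackPoints : List (Int × String × String)) (out : List Int × List Int × List Int × List Int × List Int × List Int) : Prop := out = splitFeedbackList_alt feedBackPoints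
instance (feedBackPoints : List (Int × String × String)) (out : List Int × List Int × List Int × List Int × List Int × List Int) : Decidable (Spec_splitFeedbackList feedBackPoints out) := by unfold Spec_splitFeedbackList; infer_instance

-- ===== CLAIM (what is proved, stated in full; the proofs are below) =====
def Claim_equal_splitFeedbackList : Prop := ∀ (feedBackPoints : List (Int × String × String)), Dom_splitFeedbackList feedBackPoints → Spec_splitFeedbackList feedBackPoints (splitFeedbackList feedBackPoints)

-- ===== LEMMAS AND PROOFS =====
-- loop invariant: folding A's step from any accumulators appends B's six filter results
theorem pvFold_eq (l : List (Int × String × String))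
    (gr ga ar ag ra rg : List Int) :
    l.foldl pvStepA (gr, ga, ar, ag, ra, rg) =
      (gr ++ pvPick l "green" "red", ga ++ pvPick l "green" "amber",
       ar ++ pvPick l "amber" "red", ag ++ pvPick l "amber" "green",
       ra ++ pvPick l "red" "amber", rg ++ pvPick l "red" "green") := by
  induction l generalizing gr ga ar ag ra rg with
  | nil => simp [pvPick]
  | cons x xs ih =>
    simp only [List.foldl_cons, pvStepA]
    split_ifs <;> simp_all [ih, pvPick, List.filter_cons]

-- ===== VERDICT (by name: the statement is the Claim_ definition above) =====
theorem splitFeedbackList_spec : Claim_equal_splitFeedbackList := by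
  intro l _
  show splitFeedbackList l = splitFeedbackList_alt l
  simp [splitFeedbackList, splitFeedbackList_alt, pvFold_eq]
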